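-- pv_equiv track=rewrite | github.com/simmikumari12/1301 | hw2/poker.py | valid_hand
-- ===== SOURCE A (Python) =====
-- def valid_hand(hand):
--     # check if hand has 5 cards
--     cards = hand.split(":")
--     if len(cards) != 5:
--         return False
--     for card in cards:
--         if len(card) != 2:
--             return False
--         else:
--             if card[0] not in ['2','3','4','5','6','7','8','9','t','j','q','k','a']:
--                 return False
--             if card[1] not in ['c','d','h','s']:
--                 return False
--     return True
-- ===== SOURCE B (Python) =====
-- RANKS = set('23456789tjqka')
-- SUITS = set('cdhs')
--
-- def valid_hand(hand):
--     # positional single pass: 5 cards + 4 colons = 14 chars,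
--     # position i%3==0 rank, i%3==1 suit, i%3==2 colon
--     if len(hand) != 14:
--         return False
--     for i, ch in enumerate(hand):
--         r = i % 3
--         if r == 2:
--             if ch != ':':
--                 return False
--         elif r == 0:
--             if ch not in RANKS:
--                 return False
--         else:
--             if ch not in SUITS:
--                 return False
--     return True
-- ===== Notes on version B (the rewrite author's own statement) =====
-- stated objective: alternative
-- what changed: Replaces split(':')-then-per-card loop with a single positional pass: length must be 14 and each character is checked by its index mod 3 (rank/suit/colon), with no intermediate list of cards.
import Mathlib
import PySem

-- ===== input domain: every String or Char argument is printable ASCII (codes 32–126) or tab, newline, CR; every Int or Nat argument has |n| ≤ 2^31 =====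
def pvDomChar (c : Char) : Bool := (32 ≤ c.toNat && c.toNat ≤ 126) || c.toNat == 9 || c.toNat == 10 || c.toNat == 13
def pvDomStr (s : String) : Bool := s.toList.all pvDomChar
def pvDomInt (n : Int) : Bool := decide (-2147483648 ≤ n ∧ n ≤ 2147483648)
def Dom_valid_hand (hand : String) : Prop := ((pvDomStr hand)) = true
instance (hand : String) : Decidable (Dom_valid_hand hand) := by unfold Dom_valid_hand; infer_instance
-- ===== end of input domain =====

-- B replaces A's split(":")-then-per-card loop by a single positional pass (length must be 14; index mod 3 decides rank/suit/colon); objective: alternative decomposition, same cost.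

-- ===== PORT A =====
-- hand.split(":") with the nonempty literal separator ":" is PySem.Chars.splitOn on the character list (exact).
def valid_hand (hand : String) : Bool :=
  let cards := PySem.Chars.splitOn hand.toList [':']
  if cards.length ≠ 5 then false
  else cards.all fun card =>
    if card.length ≠ 2 then false
    else if PySem.Chars.pyGet? card 0 ∉ (['2','3','4','5','6','7','8','9','t','j','q','k','a'].map some) then false
    else if PySem.Chars.pyGet? card 1 ∉ (['c','d','h','s'].map some) then false
    else true

-- ===== PORT B =====
def valid_hand_alt (hand : String) : Bool :=
  if PySem.Str.len hand ≠ 14 then false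
  else (PySem.List.enumerate hand.toList).all fun p =>
    if PySem.Int.mod p.1 3 == 2 then p.2 == ':'
    else if PySem.Int.mod p.1 3 == 0 then "23456789tjqka".toList.contains p.2
    else "cdhs".toList.contains p.2

-- ===== PRECONDITION & SPEC =====
def Spec_valid_hand (hand : String) (out : Bool) : Prop := out = valid_hand_alt hand
instance (hand : String) (out : Bool) : Decidable (Spec_valid_hand hand out) := by unfold Spec_valid_hand; infer_instance

-- ===== CLAIM (what is proved, stated in full; the proofs are below) =====
def Claim_equal_valid_hand : Prop := ∀ (hand : String), Dom_valid_hand hand → Spec_valid_hand hand (valid_hand hand)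

-- ===== LEMMAS AND PROOFS =====

def pvRanks : List Char := ['2','3','4','5','6','7','8','9','t','j','q','k','a']
def pvSuits : List Char := ['c','d','h','s']

-- the common characterisation of both programs: 5 valid 2-char cards joined by colons
def pvShape (cs : List Char) : Prop :=
  ∃ r1 s1 r2 s2 r3 s3 r4 s4 r5 s5 : Char,
    cs = [r1,s1,':',r2,s2,':',r3,s3,':',r4,s4,':',r5,s5] ∧
    r1 ∈ pvRanks ∧ r2 ∈ pvRanks ∧ r3 ∈ pvRanks ∧ r4 ∈ pvRanks ∧ r5 ∈ pvRanks ∧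
    s1 ∈ pvSuits ∧ s2 ∈ pvSuits ∧ s3 ∈ pvSuits ∧ s4 ∈ pvSuits ∧ s5 ∈ pvSuits

-- fuel-free model of split-on-colon
def pvSplit : List Char → List Char → List (List Char)
  | [], cur => [cur.reverse]
  | c :: rest, cur => if c = ':' then cur.reverse :: pvSplit rest [] else pvSplit rest (c :: cur)

lemma pv_go_eq : ∀ (fuel : Nat) (l cur : List Char) (acc : List (List Char)), l.length < fuel →
    PySem.Chars.splitOn.go [':'] fuel l cur acc = acc.reverse ++ pvSplit l cur := by
  intro fuel
  induction fuel with
  | zero => intro l cur acc h; omega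
  | succ n ih =>
    intro l cur acc h
    cases l with
    | nil => simp [PySem.Chars.splitOn.go, pvSplit]
    | cons c rest =>
      by_cases hc : c = ':'
      · subst hc
        simp only [PySem.Chars.splitOn.go, List.isPrefixOf, pvSplit]
        simp [ih rest [] _ (by simp at h ⊢; omega)]
      · simp only [PySem.Chars.splitOn.go, List.isPrefixOf, pvSplit]
        simp [hc, ih rest (c :: cur) acc (by simp at h ⊢; omega)]
        exact fun h' => absurd h'.symm hc

lemma pv_splitOn_eq (cs : List Char) : PySem.Chars.splitOn cs [':'] = pvSplit cs [] := by
  simp [PySem.Chars.splitOn, pv_go_eq (cs.length + 1) cs [] [] (by omega)]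

def pvJoin : List (List Char) → List Char
  | [] => []
  | [p] => p
  | p :: ps => p ++ ':' :: pvJoin ps

lemma pvSplit_ne_nil (cs cur : List Char) : pvSplit cs cur ≠ [] := by
  induction cs generalizing cur with
  | nil => simp [pvSplit]
  | cons c rest ih => by_cases hc : c = ':' <;> simp [pvSplit, hc, ih]

lemma pvJoin_cons (p : List Char) (ps : List (List Char)) (h : ps ≠ []) :
    pvJoin (p :: ps) = p ++ ':' :: pvJoin ps := by
  cases ps with
  | nil => simp at h
  | cons q qs => rfl

lemma pvJoin_pvSplit : ∀ (cs cur : List Char), pvJoin (pvSplit cs cur) = cur.reverse ++ cs := by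
  intro cs
  induction cs with
  | nil => intro cur; simp [pvSplit, pvJoin]
  | cons c rest ih =>
    intro cur
    by_cases hc : c = ':'
    · subst hc
      rw [pvSplit, if_pos rfl, pvJoin_cons _ _ (pvSplit_ne_nil _ _), ih []]
      simp
    · rw [pvSplit, if_neg hc, ih (c :: cur)]
      simp

lemma pv_rank_ne_colon {c : Char} (h : c ∈ pvRanks) : c ≠ ':' := by
  fin_cases h <;> decide

lemma pv_suit_ne_colon {c : Char} (h : c ∈ pvSuits) : c ≠ ':' := by
  fin_cases h <;> decide

lemma pv_len5 {α : Type} (l : List α) (hl : l.length = 5) :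
    ∃ a b c d e, l = [a,b,c,d,e] := by
  rcases l with _|⟨a,l⟩; · simp at hl
  rcases l with _|⟨b,l⟩; · simp at hl
  rcases l with _|⟨c,l⟩; · simp at hl
  rcases l with _|⟨d,l⟩; · simp at hl
  rcases l with _|⟨e,l⟩; · simp at hl
  rcases l with _|⟨x,l⟩
  · exact ⟨a,b,c,d,e,rfl⟩
  · simp at hl

lemma pv_len14 {α : Type} (l : List α) (hl : l.length = 14) :
    ∃ a b c d e f g h i j k m n o, l = [a,b,c,d,e,f,g,h,i,j,k,m,n,o] := by
  rcases l with _|⟨a,l⟩; · simp at hl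
  rcases l with _|⟨b,l⟩; · simp at hl
  rcases l with _|⟨c,l⟩; · simp at hl
  rcases l with _|⟨d,l⟩; · simp at hl
  rcases l with _|⟨e,l⟩; · simp at hl
  rcases l with _|⟨f,l⟩; · simp at hl
  rcases l with _|⟨g,l⟩; · simp at hl
  rcases l with _|⟨h,l⟩; · simp at hl
  rcases l with _|⟨i,l⟩; · simp at hl
  rcases l with _|⟨j,l⟩; · simp at hl
  rcases l with _|⟨k,l⟩; · simp at hl
  rcases l with _|⟨m,l⟩; · simp at hl
  rcases l with _|⟨n,l⟩; · simp at hl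
  rcases l with _|⟨o,l⟩; · simp at hl
  rcases l with _|⟨x,l⟩
  · exact ⟨a,b,c,d,e,f,g,h,i,j,k,m,n,o,rfl⟩
  · simp at hl

lemma pv_card (card : List Char)
    (h : (if card.length ≠ 2 then false
      else if PySem.Chars.pyGet? card 0 ∉ (['2','3','4','5','6','7','8','9','t','j','q','k','a'].map some) then false
      else if PySem.Chars.pyGet? card 1 ∉ (['c','d','h','s'].map some) then false
      else true) = true) :
    ∃ r s, card = [r, s] ∧ r ∈ pvRanks ∧ s ∈ pvSuits := by
  by_cases h2 : card.length = 2
  · obtain ⟨r, s, rfl⟩ := List.length_eq_two.mp h2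
    simp [PySem.Chars.pyGet?, pvRanks, pvSuits] at h ⊢
    rcases h with ⟨hr, hs⟩
    exact ⟨hr, hs⟩
  · simp [h2] at h

lemma pv_charA (hand : String) : valid_hand hand = true ↔ pvShape hand.toList := by
  unfold valid_hand
  simp only [pv_splitOn_eq]
  constructor
  · intro hA
    by_cases h5 : (pvSplit hand.toList []).length = 5
    · simp only [h5, ne_eq, not_true_eq_false, if_neg, not_false_eq_true] at hA
      obtain ⟨c1, c2, c3, c4, c5, hparts⟩ := pv_len5 _ h5
      rw [hparts] at hA
      simp only [List.all_cons, List.all_nil, Bool.and_true, Bool.and_eq_true] at hA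
      obtain ⟨h1, h2, h3, h4, h5'⟩ := hA
      obtain ⟨r1, s1, rfl, m1, n1⟩ := pv_card _ h1
      obtain ⟨r2, s2, rfl, m2, n2⟩ := pv_card _ h2
      obtain ⟨r3, s3, rfl, m3, n3⟩ := pv_card _ h3
      obtain ⟨r4, s4, rfl, m4, n4⟩ := pv_card _ h4
      obtain ⟨r5, s5, rfl, m5, n5⟩ := pv_card _ h5'
      have hj := pvJoin_pvSplit hand.toList []
      rw [hparts] at hj
      refine ⟨r1, s1, r2, s2, r3, s3, r4, s4, r5, s5, ?_, m1, m2, m3, m4, m5, n1, n2, n3, n4, n5⟩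
      have hj' : hand.toList = pvJoin [[r1,s1],[r2,s2],[r3,s3],[r4,s4],[r5,s5]] := by
        simpa using hj.symm
      rw [hj']
      rfl
    · simp [h5] at hA
  · rintro ⟨r1,s1,r2,s2,r3,s3,r4,s4,r5,s5,hcs,m1,m2,m3,m4,m5,n1,n2,n3,n4,n5⟩
    rw [hcs]
    have e1 := pv_rank_ne_colon m1
    have e2 := pv_rank_ne_colon m2
    have e3 := pv_rank_ne_colon m3
    have e4 := pv_rank_ne_colon m4
    have e5 := pv_rank_ne_colon m5
    have f1 := pv_suit_ne_colon n1
    have f2 := pv_suit_ne_colon n2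
    have f3 := pv_suit_ne_colon n3
    have f4 := pv_suit_ne_colon n4
    have f5 := pv_suit_ne_colon n5
    have hsp : pvSplit [r1,s1,':',r2,s2,':',r3,s3,':',r4,s4,':',r5,s5] [] =
        [[r1,s1],[r2,s2],[r3,s3],[r4,s4],[r5,s5]] := by
      simp [pvSplit, e1, e2, e3, e4, e5, f1, f2, f3, f4, f5]
    rw [hsp]
    simp [PySem.Chars.pyGet?, pvRanks, pvSuits] at m1 m2 m3 m4 m5 n1 n2 n3 n4 n5 ⊢
    exact ⟨⟨m1, n1⟩, ⟨m2, n2⟩, ⟨m3, n3⟩, ⟨m4, n4⟩, ⟨m5, n5⟩⟩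

lemma pv_charB (hand : String) : valid_hand_alt hand = true ↔ pvShape hand.toList := by
  unfold valid_hand_alt
  by_cases hl : PySem.Str.len hand = 14
  · have hlen : hand.toList.length = 14 := by
      simp [PySem.Str.len] at hl; exact_mod_cast hl
    obtain ⟨a,b,c,d,e,f,g,h,i,j,k,m,n,o,hcs⟩ := pv_len14 _ hlen
    have hL : (hand.length : Int) = 14 := by
      exact_mod_cast hlen
    rw [hcs]
    simp [hL, PySem.List.enumerate_cons, PySem.List.enumerate_nil, PySem.Int.mod, pvShape, pvRanks, pvSuits]
    constructor
    · rintro ⟨h1,h2,h3,h4,h5,h6,h7,h8,h9,h10,h11,h12,h13,h14⟩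
      exact ⟨⟨h3,h6,h9,h12⟩,h1,h4,h7,h10,h13,h2,h5,h8,h11,h14⟩
    · rintro ⟨⟨hc,hf,hi,hm⟩,ha,hd,hg,hj,hn,hb,he,hh,hk,ho⟩
      exact ⟨ha,hb,hc,hd,he,hf,hg,hh,hi,hj,hk,hm,hn,ho⟩
  · have hL : ¬ ((hand.length : Int) = 14) := by
      simpa [PySem.Str.len] using hl
    simp [hL]
    rintro ⟨r1,s1,r2,s2,r3,s3,r4,s4,r5,s5,hcs,-⟩
    apply hL
    have h14 : hand.toList.length = 14 := by rw [hcs]; rfl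
    exact_mod_cast (by simpa using h14 : hand.length = 14)

-- ===== VERDICT (by name: the statement is the Claim_ definition above) =====
theorem valid_hand_spec : Claim_equal_valid_hand := by
  intro hand _
  unfold Spec_valid_hand
  rw [Bool.eq_iff_iff, pv_charA, pv_charB]
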